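-- pv_equiv track=rewrite | github.com/RaghaRao314159/Symbolic_Derivative_Calculator | derivative_calculator.py | multiplicative
-- ===== SOURCE A (Python) =====
-- def bracket_count(char, count):
--   if char == "(":
--     count += 1
--   elif char == ")":
--     count -= 1
--   return count
--
-- def strip_useless_brackets(f):
--     if f[0] == "(" and f[-1] == ")":
--         return f[1:-1]
--     else:
--         return f
--
-- def multiplicative(f):
--     """
--     this function takes a large multiplicative combination and breaks down into individual expressions
--     """
--     booli = True
--     mullist = [-1]
--     divlist = []
--     count = 0
--
--     for i in range(len(f)):
--
--         a = f[i]
--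
--         count = bracket_count(a,count)
--
--         if count == 0:
--             if a == "*":
--                 mullist.append(i)
--             elif a == "/":
--                 divlist.append(i)
--
--     allist = mullist + divlist
--     allist.sort()
--
--     allist.append(len(f))
--
--     return [(lambda x: strip_useless_brackets(x) if allist[i] in mullist else "(" + strip_useless_brackets(x) + ")^(-1)")(f[allist[i]+1 : allist[i+1]])  for i in range(len(allist) - 1)]
-- ===== SOURCE B (Python) =====
-- def bracket_count(char, count):
--     if char == "(":
--         count += 1
--     elif char == ")":
--         count -= 1
--     return count
--
-- def strip_useless_brackets(f):
--     if f[0] == "(" and f[-1] == ")":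
--         return f[1:-1]
--     else:
--         return f
--
-- def multiplicative(f):
--     """single left-to-right pass: flush a factor at every top-level '*' or '/'"""
--     out = []
--     start = 0
--     is_div = False
--     depth = 0
--     for i, a in enumerate(f):
--         depth = bracket_count(a, depth)
--         if depth == 0 and (a == "*" or a == "/"):
--             seg = f[start:i]
--             out.append("(" + strip_useless_brackets(seg) + ")^(-1)" if is_div else strip_useless_brackets(seg))
--             is_div = a == "/"
--             start = i + 1
--     seg = f[start:]
--     out.append("(" + strip_useless_brackets(seg) + ")^(-1)" if is_div else strip_useless_brackets(seg))
--     return out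
-- ===== Notes on version B (the rewrite author's own statement) =====
-- stated objective: simpler
-- what changed: A collects depth-0 operator positions into two lists plus a -1 sentinel, sorts them, and decorates segments in a comprehension that re-scans the '*'-list per factor; B builds the output directly in one left-to-right pass tracking only a segment start and an is_div flag, with no position lists, sort, sentinel or membership test.
import Mathlib
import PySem

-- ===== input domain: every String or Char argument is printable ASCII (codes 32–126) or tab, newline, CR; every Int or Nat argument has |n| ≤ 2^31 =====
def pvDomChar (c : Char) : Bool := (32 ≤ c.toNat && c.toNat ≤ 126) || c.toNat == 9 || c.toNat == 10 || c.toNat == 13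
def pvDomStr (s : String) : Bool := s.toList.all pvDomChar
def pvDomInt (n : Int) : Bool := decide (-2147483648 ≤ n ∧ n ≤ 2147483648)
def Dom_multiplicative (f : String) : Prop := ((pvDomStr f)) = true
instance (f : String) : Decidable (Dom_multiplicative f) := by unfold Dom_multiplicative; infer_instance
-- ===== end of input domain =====

-- B replaces A's position-list collection + sort + sentinel/membership comprehension with one
-- direct left-to-right pass that flushes each factor at every top-level '*' or '/' (objective: simpler).

-- ===== PORT A =====
def bracketCountA (char : Char) (count : Int) : Int :=
  if char = '(' then count + 1
  else if char = ')' then count - 1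
  else count

-- f[0] / f[-1] via pyGet? (none = IndexError, excluded by Pre_); f[1:-1] via slice: exact on the admitted inputs
def stripUselessA (x : List Char) : List Char :=
  if PySem.List.pyGet? x 0 = some '(' ∧ PySem.List.pyGet? x (-1) = some ')' then
    PySem.List.slice x (some 1) (some (-1))
  else x

def multiplicative (f : String) : List String :=
  let cs := f.toList
  let n : Int := cs.length
  let st := (PySem.List.enumerate cs 0).foldl
    (fun (st : List Int × List Int × Int) p =>
      let count := bracketCountA p.2 st.2.2
      if count = 0 then
        if p.2 = '*' then (st.1 ++ [p.1], st.2.1, count)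
        else if p.2 = '/' then (st.1, st.2.1 ++ [p.1], count)
        else (st.1, st.2.1, count)
      else (st.1, st.2.1, count)) ([-1], [], 0)
  let mullist := st.1
  let allist := PySem.List.sorted (st.1 ++ st.2.1) (fun x => x) false ++ [n]
  (List.range (allist.length - 1)).map (fun i =>
    let x := PySem.List.slice cs (some (allist.getD i 0 + 1)) (some (allist.getD (i+1) 0))
    if allist.getD i 0 ∈ mullist then String.ofList (stripUselessA x)
    else String.ofList ('(' :: (stripUselessA x ++ (")^(-1)").toList)))

-- ===== PORT B =====
def bracketCountB (char : Char) (count : Int) : Int :=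
  if char = '(' then count + 1
  else if char = ')' then count - 1
  else count

def stripUselessB (x : List Char) : List Char :=
  if PySem.List.pyGet? x 0 = some '(' ∧ PySem.List.pyGet? x (-1) = some ')' then
    PySem.List.slice x (some 1) (some (-1))
  else x

def multiplicative_alt (f : String) : List String :=
  let cs := f.toList
  let st := (PySem.List.enumerate cs 0).foldl
    (fun (st : List String × Int × Bool × Int) p =>
      let depth := bracketCountB p.2 st.2.2.2
      if depth = 0 ∧ (p.2 = '*' ∨ p.2 = '/') then
        let seg := PySem.List.slice cs (some st.2.1) (some p.1)
        (st.1 ++ [if st.2.2.1 then String.ofList ('(' :: (stripUselessB seg ++ (")^(-1)").toList))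
                  else String.ofList (stripUselessB seg)],
         p.1 + 1, decide (p.2 = '/'), depth)
      else (st.1, st.2.1, st.2.2.1, depth)) ([], 0, false, 0)
  let seg := PySem.List.slice cs (some st.2.1) none
  st.1 ++ [if st.2.2.1 then String.ofList ('(' :: (stripUselessB seg ++ (")^(-1)").toList))
           else String.ofList (stripUselessB seg)]

-- ===== PRECONDITION & SPEC =====
-- spec-level description of the input: the (position, is-division) list of top-level '*'/'/' operators
def topOps (cs : List Char) (i d : Int) : List (Int × Bool) :=
  match cs with
  | [] => []
  | c :: rest =>
    let d' := if c = '(' then d + 1 else if c = ')' then d - 1 else d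
    if d' = 0 ∧ (c = '*' ∨ c = '/') then (i, decide (c = '/')) :: topOps rest (i + 1) d'
    else topOps rest (i + 1) d'

-- Pre_ excludes exactly the inputs with an empty top-level factor (an empty string, adjacent
-- top-level operators, or a leading/trailing top-level operator), on which A raises IndexError
-- in strip_useless_brackets (and B raises there too).
def Pre_multiplicative (f : String) : Prop :=
  List.IsChain (fun a b => a + 1 < b)
    ((-1 :: (topOps f.toList 0 0).map Prod.fst) ++ [(f.toList.length : Int)])
instance (f : String) : Decidable (Pre_multiplicative f) := by unfold Pre_multiplicative; infer_instance

def pvWitness_multiplicative : String := "(x+1)*y/z"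

def Spec_multiplicative (f : String) (out : List String) : Prop := out = multiplicative_alt f
instance (f : String) (out : List String) : Decidable (Spec_multiplicative f out) := by unfold Spec_multiplicative; infer_instance

-- ===== CLAIM (what is proved, stated in full; the proofs are below) =====
def Claim_equal_multiplicative : Prop := ∀ (f : String), Dom_multiplicative f → Pre_multiplicative f → Spec_multiplicative f (multiplicative f)

-- ===== LEMMAS AND PROOFS =====

-- common rendering: one output factor per entry of L (pending-op position, is-division), next boundary from the tail
def rend (cs : List Char) (L : List (Int × Bool)) (n : Int) : List String :=
  match L with
  | [] => []
  | (p, b) :: rest =>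
    let nxt : Int := match rest with | [] => n | (q, _) :: _ => q
    (if b then String.ofList ('(' :: (stripUselessA (PySem.List.slice cs (some (p + 1)) (some nxt)) ++ (")^(-1)").toList))
     else String.ofList (stripUselessA (PySem.List.slice cs (some (p + 1)) (some nxt)))) :: rend cs rest n

def mulP (L : List (Int × Bool)) : List Int := (L.filter (fun q => !q.2)).map Prod.fst
def divP (L : List (Int × Bool)) : List Int := (L.filter (fun q => q.2)).map Prod.fst

def stepA (st : List Int × List Int × Int) (p : Int × Char) : List Int × List Int × Int :=
  let count := bracketCountA p.2 st.2.2
  if count = 0 then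
    if p.2 = '*' then (st.1 ++ [p.1], st.2.1, count)
    else if p.2 = '/' then (st.1, st.2.1 ++ [p.1], count)
    else (st.1, st.2.1, count)
  else (st.1, st.2.1, count)

def loopA (xs : List (Int × Char)) (st : List Int × List Int × Int) : List Int × List Int × Int :=
  xs.foldl stepA st

def loopB (cs : List Char) (xs : List (Int × Char)) (st : List String × Int × Bool × Int) :
    List String × Int × Bool × Int :=
  xs.foldl
    (fun (st : List String × Int × Bool × Int) p =>
      let depth := bracketCountB p.2 st.2.2.2
      if depth = 0 ∧ (p.2 = '*' ∨ p.2 = '/') then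
        let seg := PySem.List.slice cs (some st.2.1) (some p.1)
        (st.1 ++ [if st.2.2.1 then String.ofList ('(' :: (stripUselessB seg ++ (")^(-1)").toList))
                  else String.ofList (stripUselessB seg)],
         p.1 + 1, decide (p.2 = '/'), depth)
      else (st.1, st.2.1, st.2.2.1, depth)) st

theorem multiplicative_unfold (f : String) :
    multiplicative f =
      (let cs := f.toList
       let n : Int := cs.length
       let st := loopA (PySem.List.enumerate cs 0) ([-1], [], 0)
       let mullist := st.1
       let allist := PySem.List.sorted (st.1 ++ st.2.1) (fun x => x) false ++ [n]
       (List.range (allist.length - 1)).map (fun i =>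
         let x := PySem.List.slice cs (some (allist.getD i 0 + 1)) (some (allist.getD (i+1) 0))
         if allist.getD i 0 ∈ mullist then String.ofList (stripUselessA x)
         else String.ofList ('(' :: (stripUselessA x ++ (")^(-1)").toList)))) := rfl

theorem multiplicative_alt_unfold (f : String) :
    multiplicative_alt f =
      (let cs := f.toList
       let st := loopB cs (PySem.List.enumerate cs 0) ([], 0, false, 0)
       let seg := PySem.List.slice cs (some st.2.1) none
       st.1 ++ [if st.2.2.1 then String.ofList ('(' :: (stripUselessB seg ++ (")^(-1)").toList))
                else String.ofList (stripUselessB seg)]) := rfl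

theorem strip_eq : stripUselessB = stripUselessA := rfl

theorem topOps_bound (cs : List Char) : ∀ (k d : Int), ∀ q ∈ topOps cs k d, k ≤ q.1 := by
  induction cs with
  | nil => intro k d q h; simp [topOps] at h
  | cons c rest ih =>
    intro k d q h
    simp only [topOps] at h
    split_ifs at h
    all_goals first
      | (rcases List.mem_cons.mp h with h | h
         · subst h; simp
         · have := ih (k + 1) _ q h; omega)
      | (have := ih (k + 1) _ q h; omega)

theorem topOps_pairwise (cs : List Char) : ∀ (k d : Int),
    (topOps cs k d).Pairwise (fun a b => a.1 < b.1) := by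
  induction cs with
  | nil => intro k d; simp [topOps]
  | cons c rest ih =>
    intro k d
    simp only [topOps]
    split_ifs
    all_goals first
      | (refine List.Pairwise.cons ?_ (ih _ _)
         intro q hq
         have := topOps_bound rest (k + 1) _ q hq
         simp
         omega)
      | exact ih _ _

theorem slice_from_eq_slice_len {α : Type} (xs : List α) (a : Int) (ha : 0 ≤ a) :
    PySem.List.slice xs (some a) none = PySem.List.slice xs (some a) (some (xs.length : Int)) := by
  rw [PySem.List.slice_from _ ha, PySem.List.slice_toNat _ ha (by positivity)]
  rw [List.take_of_length_le]; simp

theorem loopB_rend (cs : List Char) (rest : List Char) :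
    ∀ (k d start : Int) (out : List String) (isDiv : Bool), 0 ≤ start → 0 ≤ k →
    (let st := loopB cs (PySem.List.enumerate rest k) (out, start, isDiv, d)
     st.1 ++ [if st.2.2.1 then String.ofList ('(' :: (stripUselessB (PySem.List.slice cs (some st.2.1) none) ++ (")^(-1)").toList))
              else String.ofList (stripUselessB (PySem.List.slice cs (some st.2.1) none))]) =
    out ++ rend cs ((start - 1, isDiv) :: topOps rest k d) (cs.length : Int) := by
  induction rest with
  | nil =>
    intro k d start out isDiv hs hk
    simp only [PySem.List.enumerate_nil, loopB, List.foldl_nil, rend, strip_eq, topOps]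
    rw [slice_from_eq_slice_len cs start hs]
    simp [sub_add_cancel]
  | cons c rest ih =>
    intro k d start out isDiv hs hk
    rw [PySem.List.enumerate_cons]
    simp only [loopB, List.foldl_cons]
    by_cases h : bracketCountB c d = 0 ∧ (c = '*' ∨ c = '/')
    · rw [if_pos h]
      have hb : loopB cs (PySem.List.enumerate rest (k + 1))
          (out ++ [if isDiv then String.ofList ('(' :: (stripUselessB (PySem.List.slice cs (some start) (some k)) ++ (")^(-1)").toList))
                   else String.ofList (stripUselessB (PySem.List.slice cs (some start) (some k)))],
           k + 1, decide (c = '/'), bracketCountB c d) = _ := rfl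
      have := ih (k + 1) (bracketCountB c d) (k + 1)
        (out ++ [if isDiv then String.ofList ('(' :: (stripUselessB (PySem.List.slice cs (some start) (some k)) ++ (")^(-1)").toList))
                 else String.ofList (stripUselessB (PySem.List.slice cs (some start) (some k)))])
        (decide (c = '/')) (by omega) (by omega)
      simp only [loopB] at this ⊢
      rw [this]
      have htop : topOps (c :: rest) k d = (k, decide (c = '/')) :: topOps rest (k + 1) (bracketCountB c d) := by
        simp only [topOps, bracketCountB] at h ⊢
        rw [if_pos h]
      rw [htop]
      simp only [rend, strip_eq, add_sub_cancel_right, sub_add_cancel, List.append_assoc,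
        List.singleton_append]
    · rw [if_neg h]
      have := ih (k + 1) (bracketCountB c d) start out isDiv hs (by omega)
      simp only [loopB] at this ⊢
      rw [this]
      have htop : topOps (c :: rest) k d = topOps rest (k + 1) (bracketCountB c d) := by
        simp only [topOps, bracketCountB] at h ⊢
        rw [if_neg h]
      rw [htop]

theorem multiplicative_alt_eq_rend (f : String) :
    multiplicative_alt f = rend f.toList ((-1, false) :: topOps f.toList 0 0) (f.toList.length : Int) := by
  rw [multiplicative_alt_unfold]
  have := loopB_rend f.toList f.toList 0 0 0 [] false (by omega) (by omega)
  simpa using this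

def depthAfter (cs : List Char) (d : Int) : Int :=
  cs.foldl (fun d c => if c = '(' then d + 1 else if c = ')' then d - 1 else d) d

theorem loopA_eq (rest : List Char) : ∀ (k d : Int) (m dv : List Int),
    loopA (PySem.List.enumerate rest k) (m, dv, d) =
      (m ++ mulP (topOps rest k d), dv ++ divP (topOps rest k d), depthAfter rest d) := by
  induction rest with
  | nil => intro k d m dv; simp [loopA, topOps, mulP, divP, depthAfter, PySem.List.enumerate_nil]
  | cons c rest ih =>
    intro k d m dv
    rw [PySem.List.enumerate_cons]
    rw [show loopA ((k, c) :: PySem.List.enumerate rest (k + 1)) (m, dv, d)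
        = loopA (PySem.List.enumerate rest (k + 1)) (stepA (m, dv, d) (k, c)) from rfl]
    have hstep : stepA (m, dv, d) (k, c) =
        (if bracketCountA c d = 0 ∧ c = '*' then m ++ [k] else m,
         if bracketCountA c d = 0 ∧ ¬ c = '*' ∧ c = '/' then dv ++ [k] else dv,
         bracketCountA c d) := by
      by_cases h0 : bracketCountA c d = 0
      · by_cases hm : c = '*'
        · subst hm; simp [stepA, h0]
        · by_cases hd : c = '/'
          · subst hd; simp [stepA, h0, hm]
          · simp [stepA, h0, hm, hd]
      · simp [stepA, h0]
    rw [hstep, ih]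
    have htop : topOps (c :: rest) k d =
        (if bracketCountA c d = 0 ∧ (c = '*' ∨ c = '/') then [(k, decide (c = '/'))] else []) ++
          topOps rest (k + 1) (bracketCountA c d) := by
      simp only [topOps, bracketCountA]
      split_ifs <;> simp_all
    have hdep : depthAfter (c :: rest) d = depthAfter rest (bracketCountA c d) := rfl
    rw [htop, hdep]
    by_cases h0 : bracketCountA c d = 0
    · by_cases hm : c = '*'
      · subst hm; simp [h0, mulP, divP]
      · by_cases hd : c = '/'
        · subst hd; simp [h0, hm, mulP, divP]
        · simp [h0, hm, hd, mulP, divP]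
    · simp [h0, mulP, divP]

theorem sorted_allist (P : List (Int × Bool)) (hpw : P.Pairwise (fun a b => a.1 < b.1))
    (hpos : ∀ q ∈ P, 0 ≤ q.1) :
    PySem.List.sorted (-1 :: (mulP P ++ divP P)) (fun x => x) false = -1 :: P.map Prod.fst := by
  apply PySem.List.sorted_eq_of_perm_of_pairwise_lt
  · refine List.Perm.cons _ ?_
    have h1 := List.filter_append_perm (fun q => !q.2) P
    have h2 : (P.filter fun q => !!q.2) = P.filter (fun q => q.2) := by
      apply List.filter_congr; intro x _; simp
    rw [h2] at h1
    have h3 := h1.map Prod.fst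
    rw [List.map_append] at h3
    exact h3.symm
  · refine List.Pairwise.cons ?_ ?_
    · intro y hy
      rcases List.mem_map.mp hy with ⟨q, hq, rfl⟩
      have := hpos q hq
      omega
    · exact List.pairwise_map.mpr hpw

theorem range_pairs (g : Int → Int → String) : ∀ (l : List Int),
    (List.range (l.length - 1)).map (fun i => g (l.getD i 0) (l.getD (i + 1) 0)) =
      (l.zip l.tail).map (fun p => g p.1 p.2) := by
  intro l
  induction l with
  | nil => simp
  | cons a l ih =>
    cases l with
    | nil => simp
    | cons b t =>
      have hlen : (a :: b :: t : List Int).length - 1 = t.length + 1 := by simp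
      rw [hlen, List.range_succ_eq_map, List.map_cons, List.map_map]
      have hcomp : ((fun i => g ((a :: b :: t).getD i 0) ((a :: b :: t).getD (i + 1) 0)) ∘ Nat.succ)
          = (fun i => g ((b :: t).getD i 0) ((b :: t).getD (i + 1) 0)) := by
        funext i; simp
      have hlen2 : t.length = (b :: t : List Int).length - 1 := by simp
      rw [hcomp, hlen2, ih]
      simp

theorem mem_mulP_iff (L : List (Int × Bool)) (x : Int) : x ∈ mulP L ↔ (x, false) ∈ L := by
  constructor
  · intro h
    rcases List.mem_map.mp h with ⟨⟨a, b⟩, hq, rfl⟩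
    rcases List.mem_filter.mp hq with ⟨hmem, hb⟩
    simp only [Bool.not_eq_eq_eq_not, Bool.not_true] at hb
    cases b
    · exact hmem
    · simp at hb
  · intro h
    exact List.mem_map.mpr ⟨(x, false), List.mem_filter.mpr ⟨h, by simp⟩, rfl⟩

theorem mulP_cons (a : Int) (bb : Bool) (T : List (Int × Bool)) :
    mulP ((a, bb) :: T) = if bb then mulP T else a :: mulP T := by
  cases bb <;> simp [mulP]

theorem mem_mulP_topOps (cs : List Char) : ∀ (k d : Int) (p : Int) (b : Bool),
    (p, b) ∈ topOps cs k d → (p ∈ mulP (topOps cs k d) ↔ b = false) := by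
  induction cs with
  | nil => intro k d p b h; simp [topOps] at h
  | cons c rest ih =>
    intro k d p b h
    by_cases hc : (if c = '(' then d + 1 else if c = ')' then d - 1 else d) = 0 ∧ (c = '*' ∨ c = '/')
    · have htop : topOps (c :: rest) k d =
          (k, decide (c = '/')) :: topOps rest (k + 1) (if c = '(' then d + 1 else if c = ')' then d - 1 else d) := by
        simp only [topOps]; rw [if_pos hc]
      rw [htop] at h ⊢
      rw [mulP_cons]
      rcases List.mem_cons.mp h with heq | hmem
      · have hp : p = k := congrArg Prod.fst heq
        have hb : b = decide (c = '/') := congrArg Prod.snd heq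
        by_cases hdv : c = '/'
        · have hbt : b = true := by rw [hb]; simp [hdv]
          rw [show decide (c = '/') = true from by simp [hdv], if_pos rfl, hbt]
          constructor
          · intro hmem2
            have hbd := topOps_bound rest _ _ _ ((mem_mulP_iff _ _).mp hmem2)
            simp only [] at hbd
            omega
          · intro hne; simp at hne
        · have hbf : b = false := by rw [hb]; simp [hdv]
          rw [show decide (c = '/') = false from by simp [hdv], hbf]
          simp [hp]
      · have hbd := topOps_bound rest _ _ _ hmem
        simp only [] at hbd
        have hih := ih (k + 1) _ p b hmem
        by_cases hdv : c = '/'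
        · rw [show decide (c = '/') = true from by simp [hdv], if_pos rfl]
          exact hih
        · rw [show decide (c = '/') = false from by simp [hdv]]
          simp only [Bool.false_eq_true, if_neg (by simp : ¬ False)]
          rw [List.mem_cons]
          have hpk : ¬ p = k := by omega
          simp only [hpk, false_or]
          exact hih
    · have htop : topOps (c :: rest) k d =
          topOps rest (k + 1) (if c = '(' then d + 1 else if c = ')' then d - 1 else d) := by
        simp only [topOps]; rw [if_neg hc]
      rw [htop] at h ⊢
      exact ih (k + 1) _ p b h

theorem zip_rend (cs : List Char) (n : Int) (mul : List Int) :
    ∀ (L : List (Int × Bool)),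
      (∀ p ∈ L, (p.1 ∈ mul ↔ p.2 = false)) →
      ((L.map Prod.fst ++ [n]).zip ((L.map Prod.fst ++ [n]).tail)).map
        (fun p =>
          if p.1 ∈ mul then String.ofList (stripUselessA (PySem.List.slice cs (some (p.1 + 1)) (some p.2)))
          else String.ofList ('(' :: (stripUselessA (PySem.List.slice cs (some (p.1 + 1)) (some p.2)) ++ (")^(-1)").toList))) =
      rend cs L n := by
  intro L
  induction L with
  | nil => intro _; simp [rend]
  | cons q L ih =>
    intro h
    obtain ⟨p, b⟩ := q
    have hq := h (p, b) List.mem_cons_self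
    simp only [] at hq
    have hrest : ∀ p ∈ L, (p.1 ∈ mul ↔ p.2 = false) := fun p hp => h p (List.mem_cons_of_mem _ hp)
    cases L with
    | nil =>
      simp only [List.map_cons, List.map_nil, List.nil_append, List.cons_append, List.tail_cons,
        List.zip_cons_cons, List.zip_nil_right, List.map_nil, rend]
      cases b
      · have hp : p ∈ mul := hq.mpr rfl
        simp [hp]
      · have hp : ¬ p ∈ mul := fun hm => by simpa using hq.mp hm
        simp [hp]
    | cons q' L' =>
      have htail := ih hrest
      simp only [List.map_cons, List.cons_append, List.tail_cons, List.zip_cons_cons,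
        List.map_cons] at htail ⊢
      rw [htail]
      simp only [rend]
      cases b
      · have hp : p ∈ mul := hq.mpr rfl
        simp [hp]
      · have hp : ¬ p ∈ mul := fun hm => by simpa using hq.mp hm
        simp [hp]

theorem multiplicative_eq_rend (f : String) :
    multiplicative f = rend f.toList ((-1, false) :: topOps f.toList 0 0) (f.toList.length : Int) := by
  rw [multiplicative_unfold]
  simp only [loopA_eq, List.nil_append, List.cons_append]
  rw [sorted_allist (topOps f.toList 0 0) (topOps_pairwise f.toList 0 0)
    (fun q hq => by have := topOps_bound f.toList 0 0 q hq; omega)]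
  have hmem : ∀ p ∈ ((-1, false) :: topOps f.toList 0 0),
      (p.1 ∈ (-1 :: mulP (topOps f.toList 0 0)) ↔ p.2 = false) := by
    intro p hp
    rcases List.mem_cons.mp hp with rfl | hp
    · simp
    · obtain ⟨x, b⟩ := p
      have hbd := topOps_bound f.toList 0 0 _ hp
      simp only [] at hbd ⊢
      have hx : ¬ x = -1 := by omega
      rw [List.mem_cons]
      simp only [hx, false_or]
      exact mem_mulP_topOps f.toList 0 0 x b hp
  exact (range_pairs
      (fun a b =>
        if a ∈ (-1 :: mulP (topOps f.toList 0 0)) then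
          String.ofList (stripUselessA (PySem.List.slice f.toList (some (a + 1)) (some b)))
        else
          String.ofList ('(' :: (stripUselessA (PySem.List.slice f.toList (some (a + 1)) (some b)) ++ (")^(-1)").toList)))
      ((-1 :: (topOps f.toList 0 0).map Prod.fst) ++ [(f.toList.length : Int)])).trans
    (zip_rend f.toList (f.toList.length : Int) (-1 :: mulP (topOps f.toList 0 0))
      ((-1, false) :: topOps f.toList 0 0) hmem)

-- ===== VERDICT (by name: the statement is the Claim_ definition above) =====
theorem multiplicative_spec : Claim_equal_multiplicative := by
  intro f _ _
  unfold Spec_multiplicative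
  rw [multiplicative_eq_rend, multiplicative_alt_eq_rend]
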